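-- pv_equiv track=rewrite | github.com/airr-community/ogrdb | sequence_format.py | format_nuc_sequence
-- ===== SOURCE A (Python) =====
-- def chunks(l, n):
--     " Yield successive n-sized chunks from l."
--     for i in range(0, len(l), n):
--         yield l[i:i + n]
--
-- def apply_annots(frag, startpos, ra, gapped):
--     if not ra:
--         return frag
--
--     ret = ''
--     pos = startpos
--
--     for i in range(len(frag)):
--         if not gapped or (frag[i] != '.' and frag[i] != ' '):
--             if pos in ra:
--                 ret += "<span class='highlight-nuc' data-toggle='tooltip' title='%s'>" % ra[pos] + frag[i] + "</span>"
--             else: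
--                 ret += frag[i]
--             pos += 1
--         else:
--             ret += frag[i]
--
--     return ret
--
-- def format_nuc_sequence(seq, width, ra=None, gapped=False):
--     ind = 1
--     ungapped_ind = 1
--     ret = ''
--
--     if seq is None or len(seq) == 0:
--         return ''
--
--     for frag in chunks(seq, width):
--         ret += '%-5d' % ind
--         if len(frag) > 10:
--             ret += ' '*(len(frag)-10) + '%5d' % (ind + len(frag) - 1)
--         ret += '\n' + apply_annots(frag, ungapped_ind-1, ra, gapped) + '\n\n'
--         ind += len(frag)
--         ungapped_ind += len(frag.replace('.', '')) if gapped else len(frag)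
--
--     return ret
-- ===== SOURCE B (Python) =====
-- def format_nuc_sequence(seq, width, ra=None, gapped=False):
--     if seq is None or len(seq) == 0 or width < 1:
--         return ''
--     n = len(seq)
--     parts = []
--     dotfree = 0          # characters other than '.' seen so far (header/annotation base when gapped)
--     pos = 0              # annotation position within the current line
--     for i, ch in enumerate(seq):
--         if i % width == 0:
--             blk = width if width <= n - i else n - i
--             parts.append('%-5d' % (i + 1))
--             if blk > 10:
--                 parts.append(' ' * (blk - 10) + '%5d' % (i + blk))
--             parts.append('\n')
--             pos = dotfree if gapped else i
--         if gapped and (ch == '.' or ch == ' '):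
--             parts.append(ch)
--         else:
--             t = ra.get(pos) if ra else None
--             if t is None:
--                 parts.append(ch)
--             else:
--                 parts.append("<span class='highlight-nuc' data-toggle='tooltip' title='%s'>%s</span>" % (t, ch))
--             pos += 1
--         if ch != '.':
--             dotfree += 1
--         if i % width == width - 1 or i == n - 1:
--             parts.append('\n\n')
--     return ''.join(parts)
-- ===== Notes on version B (the rewrite author's own statement) =====
-- stated objective: alternative
-- what changed: B replaces A's chunk-slicing loop with a per-fragment annotation helper by one flat pass over the characters that emits the header whenever the index hits a block boundary and decides each character's highlight inline, tracking the '.-free' counter globally.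
import Mathlib
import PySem

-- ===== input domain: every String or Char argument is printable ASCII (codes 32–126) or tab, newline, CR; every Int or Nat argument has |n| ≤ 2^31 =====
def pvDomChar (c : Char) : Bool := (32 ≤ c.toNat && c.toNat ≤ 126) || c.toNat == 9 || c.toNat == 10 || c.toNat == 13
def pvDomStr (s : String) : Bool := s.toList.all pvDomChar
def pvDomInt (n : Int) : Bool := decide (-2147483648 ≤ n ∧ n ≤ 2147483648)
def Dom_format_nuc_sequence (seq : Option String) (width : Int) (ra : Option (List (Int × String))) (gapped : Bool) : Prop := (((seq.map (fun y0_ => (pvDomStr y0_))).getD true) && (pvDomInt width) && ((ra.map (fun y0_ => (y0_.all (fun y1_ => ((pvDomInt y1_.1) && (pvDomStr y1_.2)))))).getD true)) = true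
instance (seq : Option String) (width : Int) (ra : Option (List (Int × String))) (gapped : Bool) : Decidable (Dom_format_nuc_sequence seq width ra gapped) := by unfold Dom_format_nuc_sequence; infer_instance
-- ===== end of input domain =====

-- B makes one flat pass over the characters (headers emitted when the index hits a
-- block boundary, annotation decided per character) instead of A's chunk-slicing with a
-- per-fragment helper; same return value on Pre_ (A raises ValueError at width = 0 on a
-- nonempty sequence, where B returns '').

-- shared literal pieces (both Python sources contain the same format strings)
def pvSpanOpen : List Char := "<span class='highlight-nuc' data-toggle='tooltip' title='".toList
def pvSpanMid : List Char := "'>".toList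
def pvSpanClose : List Char := "</span>".toList
-- '%-5d' % n  and  '%5d' % n
def pvLjust5 (n : Int) : List Char :=
  let s := PySem.Int.toChars n
  s ++ List.replicate (5 - s.length) ' '
def pvRjust5 (n : Int) : List Char :=
  let s := PySem.Int.toChars n
  List.replicate (5 - s.length) ' ' ++ s
-- the dict argument (None = empty dict; Python dict from pairs = PySem.Dict.ofList)
def pvDict (ra : Option (List (Int × String))) : PySem.Dict Int String :=
  match ra with
  | none => PySem.Dict.empty
  | some l => PySem.Dict.ofList l

-- ===== PORT A =====
-- apply_annots' loop over range(len(frag)), reading frag[i] in order = structural recursion on frag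
def pvApplyAnnotsGo (d : PySem.Dict Int String) (gapped : Bool) : List Char → Int → List Char → List Char
  | [], _, ret => ret
  | c :: rest, pos, ret =>
    if !gapped || (c != '.' && c != ' ') then
      match d.get? pos with   -- 'pos in ra' then 'ra[pos]'
      | some t => pvApplyAnnotsGo d gapped rest (pos + 1)
          (ret ++ pvSpanOpen ++ t.toList ++ pvSpanMid ++ [c] ++ pvSpanClose)
      | none => pvApplyAnnotsGo d gapped rest (pos + 1) (ret ++ [c])
    else pvApplyAnnotsGo d gapped rest pos (ret ++ [c])

def pvApplyAnnots (frag : List Char) (startpos : Int) (d : PySem.Dict Int String) (gapped : Bool) : List Char :=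
  if d.size = 0 then frag   -- 'if not ra: return frag'
  else pvApplyAnnotsGo d gapped frag startpos []

-- the 'for frag in chunks(seq, width)' loop: chunks yields seq[i:i+width] for i in range(0, len(seq), width)
def pvFmtGoA (cs : List Char) (width : Int) (d : PySem.Dict Int String) (gapped : Bool) :
    List Int → Int → Int → List Char → List Char
  | [], _, _, ret => ret
  | i :: rest, ind, ug, ret =>
    let frag := PySem.List.slice cs (some i) (some (i + width))
    let ret1 := ret ++ pvLjust5 ind
    let ret2 := if 10 < frag.length then
        ret1 ++ List.replicate (frag.length - 10) ' ' ++ pvRjust5 (ind + (frag.length : Int) - 1)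
      else ret1
    let ret3 := ret2 ++ ['\n'] ++ pvApplyAnnots frag (ug - 1) d gapped ++ ['\n', '\n']
    pvFmtGoA cs width d gapped rest (ind + (frag.length : Int))
      (ug + (if gapped then ((PySem.Chars.replace frag ['.'] []).length : Int) else (frag.length : Int)))
      ret3

def format_nuc_sequence (seq : Option String) (width : Int) (ra : Option (List (Int × String))) (gapped : Bool) : String :=
  match seq with
  | none => ""
  | some s =>
    if s.toList.length = 0 then ""
    else String.ofList (pvFmtGoA s.toList width (pvDict ra) gapped
      (PySem.List.pyRange 0 (s.toList.length : Int) width) 1 1 [])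

-- ===== PORT B =====
-- single pass over the characters; i is the raw index, dotfree counts the non-'.'
-- characters seen so far, pos is the annotation position within the current line
def pvFmtGoB (width : Int) (d : PySem.Dict Int String) (gapped : Bool) (n : Int) :
    List Char → Int → Int → Int → List Char → List Char
  | [], _, _, _, acc => acc
  | c :: rest, i, dotfree, pos, acc =>
    let hdr := PySem.Int.mod i width == 0
    let acc1 := if hdr then
        let blk := if width ≤ n - i then width else n - i
        let a := acc ++ pvLjust5 (i + 1)
        let a := if 10 < blk then a ++ List.replicate (blk - 10).toNat ' ' ++ pvRjust5 (i + blk) else a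
        a ++ ['\n']
      else acc
    let pos1 := if hdr then (if gapped then dotfree else i) else pos
    -- 'ra.get(pos)' : get? on the empty dict is none, so the 'if ra' guard is exact
    let acc2 := acc1 ++ (if gapped && (c == '.' || c == ' ') then [c]
      else match d.get? pos1 with
        | none => [c]
        | some t => pvSpanOpen ++ t.toList ++ pvSpanMid ++ [c] ++ pvSpanClose)
    let pos2 := if gapped && (c == '.' || c == ' ') then pos1 else pos1 + 1
    let dotfree1 := if c != '.' then dotfree + 1 else dotfree
    let acc3 := if PySem.Int.mod i width == width - 1 || i == n - 1 then acc2 ++ ['\n', '\n'] else acc2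
    pvFmtGoB width d gapped n rest (i + 1) dotfree1 pos2 acc3

def format_nuc_sequence_alt (seq : Option String) (width : Int) (ra : Option (List (Int × String))) (gapped : Bool) : String :=
  match seq with
  | none => ""
  | some s =>
    if s.toList.length = 0 || width < 1 then ""
    else String.ofList (pvFmtGoB width (pvDict ra) gapped (s.toList.length : Int) s.toList 0 0 0 [])

-- ===== PRECONDITION & SPEC =====
-- Pre_ excludes only the inputs where A raises: a nonempty sequence with width = 0
-- (range(0, n, 0) raises ValueError).
def Pre_format_nuc_sequence (seq : Option String) (width : Int) (ra : Option (List (Int × String))) (gapped : Bool) : Prop :=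
  seq = none ∨ seq.getD "" = "" ∨ width ≠ 0
instance (seq : Option String) (width : Int) (ra : Option (List (Int × String))) (gapped : Bool) : Decidable (Pre_format_nuc_sequence seq width ra gapped) := by unfold Pre_format_nuc_sequence; infer_instance

def pvWitness_format_nuc_sequence : Option String × Int × (Option (List (Int × String))) × Bool :=
  (some "ACGT.A", 3, some [(1, "tip")], true)

def Spec_format_nuc_sequence (seq : Option String) (width : Int) (ra : Option (List (Int × String))) (gapped : Bool) (out : String) : Prop := out = format_nuc_sequence_alt seq width ra gapped
instance (seq : Option String) (width : Int) (ra : Option (List (Int × String))) (gapped : Bool) (out : String) : Decidable (Spec_format_nuc_sequence seq width ra gapped out) := by unfold Spec_format_nuc_sequence; infer_instance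

-- ===== CLAIM (what is proved, stated in full; the proofs are below) =====
def Claim_equal_format_nuc_sequence : Prop := ∀ (seq : Option String) (width : Int) (ra : Option (List (Int × String))) (gapped : Bool), Dom_format_nuc_sequence seq width ra gapped → Pre_format_nuc_sequence seq width ra gapped → Spec_format_nuc_sequence seq width ra gapped (format_nuc_sequence seq width ra gapped)

-- ===== LEMMAS AND PROOFS =====

-- the per-character output fragment and position step both programs produce
def pvEmit (d : PySem.Dict Int String) (gapped : Bool) (c : Char) (pos : Int) : List Char :=
  if gapped && (c == '.' || c == ' ') then [c]
  else match d.get? pos with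
    | none => [c]
    | some t => pvSpanOpen ++ t.toList ++ pvSpanMid ++ [c] ++ pvSpanClose
def pvStep (gapped : Bool) (c : Char) (pos : Int) : Int :=
  if gapped && (c == '.' || c == ' ') then pos else pos + 1
def pvEmitAll (d : PySem.Dict Int String) (gapped : Bool) : List Char → Int → List Char
  | [], _ => []
  | c :: f, pos => pvEmit d gapped c pos ++ pvEmitAll d gapped f (pvStep gapped c pos)
def pvPosAfter (gapped : Bool) : List Char → Int → Int
  | [], pos => pos
  | c :: f, pos => pvPosAfter gapped f (pvStep gapped c pos)
def pvND (f : List Char) : Int := ((f.filter (fun c => c != '.')).length : Int)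


theorem pvAnnotsGo_eq (d : PySem.Dict Int String) (gapped : Bool) :
    ∀ (f : List Char) (pos : Int) (ret : List Char),
    pvApplyAnnotsGo d gapped f pos ret = ret ++ pvEmitAll d gapped f pos := by
  intro f
  induction f with
  | nil => intro pos ret; simp [pvApplyAnnotsGo, pvEmitAll]
  | cons c rest ih =>
    intro pos ret
    by_cases hskip : gapped && (c == '.' || c == ' ')
    · have hA : (!gapped || (c != '.' && c != ' ')) = false := by
        cases gapped <;> simp_all <;> rcases hskip with h | h <;> simp [h]
      simp [pvApplyAnnotsGo, hA, pvEmitAll, pvEmit, pvStep, hskip, ih]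
    · have hA : (!gapped || (c != '.' && c != ' ')) = true := by
        cases gapped <;> simp_all
      cases hg : d.get? pos with
      | none => simp [pvApplyAnnotsGo, hA, hg, pvEmitAll, pvEmit, pvStep, hskip, ih]
      | some t => simp [pvApplyAnnotsGo, hA, hg, pvEmitAll, pvEmit, pvStep, hskip, ih]

theorem pvGet?_none_of_size_zero (d : PySem.Dict Int String) (h : d.size = 0) (k : Int) :
    d.get? k = none := by
  rcases d with ⟨items⟩
  rcases items with _ | ⟨p, rest⟩
  · simp [PySem.Dict.get?]
  · simp [PySem.Dict.size] at h

theorem pvEmitAll_of_size_zero (d : PySem.Dict Int String) (gapped : Bool) (h : d.size = 0) :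
    ∀ (f : List Char) (pos : Int), pvEmitAll d gapped f pos = f := by
  intro f
  induction f with
  | nil => intro pos; simp [pvEmitAll]
  | cons c rest ih =>
    intro pos
    by_cases hskip : gapped && (c == '.' || c == ' ') <;>
      simp [pvEmitAll, pvEmit, pvGet?_none_of_size_zero d h, ih, hskip]

theorem pvApplyAnnots_eq (d : PySem.Dict Int String) (gapped : Bool) (frag : List Char) (startpos : Int) :
    pvApplyAnnots frag startpos d gapped = pvEmitAll d gapped frag startpos := by
  unfold pvApplyAnnots
  by_cases h : d.size = 0
  · rw [if_pos h, pvEmitAll_of_size_zero d gapped h]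
  · rw [if_neg h, pvAnnotsGo_eq]; simp

theorem pvReplaceGo_eq : ∀ (fuel : Nat) (l acc : List Char), l.length ≤ fuel →
    PySem.Chars.replace.go ['.'] [] fuel l acc = acc.reverse ++ l.filter (fun c => c != '.') := by
  intro fuel
  induction fuel with
  | zero =>
    intro l acc h
    have : l = [] := by cases l <;> simp_all
    subst this
    simp [PySem.Chars.replace.go]
  | succ fu ih =>
    intro l acc h
    cases l with
    | nil => simp [PySem.Chars.replace.go]
    | cons c t =>
      by_cases hc : c = '.'
      · subst hc
        have hp : List.isPrefixOf ['.'] ('.' :: t) = true := by simp [List.isPrefixOf]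
        rw [PySem.Chars.replace.go] -- unfold one step
        simp only [hp, if_true]
        rw [ih]
        · simp
        · simpa using Nat.le_of_succ_le_succ h
      · have hp : List.isPrefixOf ['.'] (c :: t) = false := by
          simp [List.isPrefixOf]; exact fun hh => (hc hh.symm).elim
        rw [PySem.Chars.replace.go]
        simp only [hp, Bool.false_eq_true, if_false]
        rw [ih t (c :: acc) (by simpa using Nat.le_of_succ_le_succ h)]
        simp [hc]

theorem pvReplace_len (f : List Char) :
    ((PySem.Chars.replace f ['.'] []).length : Int) = pvND f := by
  unfold PySem.Chars.replace pvND
  simp [pvReplaceGo_eq f.length f [] (le_refl _)]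


theorem pvMod_add {width i j : Int} (hw : 0 < width) (hi : PySem.Int.mod i width = 0)
    (hj : 0 ≤ j) (hjw : j < width) : PySem.Int.mod (i + j) width = j := by
  rw [PySem.Int.mod_eq_emod_of_pos hw] at hi ⊢
  obtain ⟨q, hq⟩ : width ∣ i := Int.dvd_of_emod_eq_zero hi
  subst hq
  rw [Int.add_comm, Int.add_mul_emod_self_left]
  exact Int.emod_eq_of_lt hj hjw

theorem pvMod_add_width {width i : Int} (hw : 0 < width) (hi : PySem.Int.mod i width = 0) :
    PySem.Int.mod (i + width) width = 0 := by
  rw [PySem.Int.mod_eq_emod_of_pos hw] at hi ⊢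
  rw [show i + width = i + width * 1 by ring, Int.add_mul_emod_self_left]
  exact hi

theorem pvRange_nil {width : Int} (hw : 0 < width) {a b : Int} (h : b ≤ a) :
    PySem.List.pyRange a b width = [] := by
  rw [PySem.List.pyRange_of_pos a b hw, if_neg (not_lt.mpr h)]
  simp

theorem pvRange_neg_nil {width : Int} (hw : width < 0) {a b : Int} (h : a ≤ b) :
    PySem.List.pyRange a b width = [] := by
  unfold PySem.List.pyRange
  rw [if_neg (by omega)]
  simp only [if_neg (by omega : ¬ (0:Int) < width), if_neg (not_lt.mpr h)]
  simp

theorem pvRange_cons {width : Int} (hw : 0 < width) {a b : Int} (h : a < b) :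
    PySem.List.pyRange a b width = a :: PySem.List.pyRange (a + width) b width := by
  rw [PySem.List.pyRange_of_pos a b hw, PySem.List.pyRange_of_pos (a+width) b hw, if_pos h]
  by_cases hb : a + width < b
  · rw [if_pos hb]
    have h0 : 0 ≤ (b - a - 1) / width := Int.ediv_nonneg (by omega) (le_of_lt hw)
    have hc : b - a + width - 1 = (b - a - 1) + 1 * width := by ring
    have hstep : (b - a + width - 1) / width = (b - a - 1) / width + 1 := by
      rw [hc, Int.add_mul_ediv_right _ _ (by omega : width ≠ 0)]
    have h2 : b - (a + width) + width - 1 = b - a - 1 := by ring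
    rw [hstep, h2]
    rw [show ((b - a - 1)/width + 1).toNat = ((b - a - 1)/width).toNat + 1 by omega]
    rw [List.range_succ_eq_map]
    simp [List.map_map, Function.comp]
    intro k _
    ring
  · rw [if_neg hb]
    have h1 : (b - a + width - 1) / width = 1 := by
      rw [← PySem.Int.floordiv_eq_ediv_of_pos hw, PySem.Int.floordiv_eq_iff_of_pos hw]
      omega
    rw [h1]
    simp

theorem pvND_cons (c : Char) (f : List Char) :
    pvND (c :: f) = (if c != '.' then 1 else 0) + pvND f := by
  simp only [pvND, List.filter_cons]
  by_cases hc : (c != '.') = true <;> simp [hc] <;> omega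

theorem pvND_append (f g : List Char) : pvND (f ++ g) = pvND f + pvND g := by
  simp [pvND]

-- the header block B emits at index k
def pvHdr (width n k : Int) : List Char :=
  let blk := if width ≤ n - k then width else n - k
  pvLjust5 (k + 1) ++ (if 10 < blk then List.replicate (blk - 10).toNat ' ' ++ pvRjust5 (k + blk) else []) ++ ['\n']

theorem pvStepB_nohdr (d : PySem.Dict Int String) (gapped : Bool) {width : Int} (n : Int)
    (c : Char) (rest : List Char) {k : Int} (dotfree pos : Int) (acc : List Char)
    (hhdr : PySem.Int.mod k width ≠ 0) :
    pvFmtGoB width d gapped n (c :: rest) k dotfree pos acc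
      = pvFmtGoB width d gapped n rest (k + 1) (if c != '.' then dotfree + 1 else dotfree)
          (pvStep gapped c pos)
          (acc ++ pvEmit d gapped c pos
            ++ (if PySem.Int.mod k width == width - 1 || k == n - 1 then ['\n', '\n'] else [])) := by
  simp only [pvFmtGoB, hhdr, beq_iff_eq, if_false, if_neg hhdr]
  by_cases hskip : (gapped && (c == '.' || c == ' ')) = true
  · by_cases hend : (PySem.Int.mod k width == width - 1 || k == n - 1) = true <;>
      simp [pvEmit, pvStep, hskip, hend, List.append_assoc] <;> simp_all
  · cases hg : d.get? pos <;>
      by_cases hend : (PySem.Int.mod k width == width - 1 || k == n - 1) = true <;>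
      simp [pvEmit, pvStep, hskip, hend, hg, List.append_assoc] <;> simp_all

theorem pvStepB_hdr (d : PySem.Dict Int String) (gapped : Bool) {width : Int} (n : Int)
    (c : Char) (rest : List Char) {k : Int} (dotfree pos : Int) (acc : List Char)
    (hhdr : PySem.Int.mod k width = 0) :
    pvFmtGoB width d gapped n (c :: rest) k dotfree pos acc
      = pvFmtGoB width d gapped n rest (k + 1) (if c != '.' then dotfree + 1 else dotfree)
          (pvStep gapped c (if gapped then dotfree else k))
          (acc ++ pvHdr width n k ++ pvEmit d gapped c (if gapped then dotfree else k)
            ++ (if PySem.Int.mod k width == width - 1 || k == n - 1 then ['\n', '\n'] else [])) := by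
  simp only [pvFmtGoB, hhdr, pvHdr, beq_self_eq_true, if_true, beq_iff_eq]
  set pos0 := if gapped then dotfree else k with hpos0
  by_cases hskip : (gapped && (c == '.' || c == ' ')) = true
  · by_cases hend : (PySem.Int.mod k width == width - 1 || k == n - 1) = true <;>
      by_cases h10 : (10 : Int) < (if width ≤ n - k then width else n - k) <;>
      simp [pvEmit, pvStep, hskip, hend, h10, List.append_assoc] <;> simp_all
  · cases hg : d.get? pos0 <;>
      by_cases hend : (PySem.Int.mod k width == width - 1 || k == n - 1) = true <;>
      by_cases h10 : (10 : Int) < (if width ≤ n - k then width else n - k) <;>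
      simp [pvEmit, pvStep, hskip, hend, hg, h10, List.append_assoc] <;> simp_all


theorem pvInner (d : PySem.Dict Int String) (gapped : Bool) {width n i L : Int}
    (hw : 0 < width) (hmod : PySem.Int.mod i width = 0)
    (hLw : L ≤ width) (hLn : i + L ≤ n) (hend : L = width ∨ i + L = n) :
    ∀ (f : List Char), 1 ≤ f.length → ∀ (rest : List Char) (t dotfree pos : Int) (acc : List Char),
    1 ≤ t → t + (f.length : Int) = L →
    pvFmtGoB width d gapped n (f ++ rest) (i + t) dotfree pos acc
      = pvFmtGoB width d gapped n rest (i + L) (dotfree + pvND f) (pvPosAfter gapped f pos)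
          (acc ++ pvEmitAll d gapped f pos ++ ['\n', '\n']) := by
  intro f
  induction f with
  | nil => intro h; simp at h
  | cons c f' ih =>
    intro _ rest t dotfree pos acc ht hlen
    simp only [List.length_cons] at hlen
    push_cast at hlen
    have htw : t < width := by omega
    have hmt : PySem.Int.mod (i + t) width = t := pvMod_add hw hmod (by omega) htw
    rw [List.cons_append, pvStepB_nohdr d gapped n c (f' ++ rest) dotfree pos acc (by rw [hmt]; omega)]
    rcases f' with _ | ⟨c2, f''⟩
    · -- last character of the block: t = L - 1, the end test fires
      simp only [List.length_nil] at hlen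
      have hL : t = L - 1 := by push_cast at hlen; omega
      have hendT : (PySem.Int.mod (i + t) width == width - 1 || i + t == n - 1) = true := by
        rcases hend with h | h
        · simp only [Bool.or_eq_true, beq_iff_eq]; left; rw [hmt]; omega
        · simp only [Bool.or_eq_true, beq_iff_eq]; right; omega
      rw [hendT]
      simp only [List.nil_append, if_true]
      rw [show i + t + 1 = i + L by omega]
      by_cases hc : (c != '.') = true <;>
        simp [hc, pvND, List.filter_cons, pvPosAfter, pvEmitAll, List.append_assoc]
    · -- middle character: the end test does not fire
      have hendF : (PySem.Int.mod (i + t) width == width - 1 || i + t == n - 1) = false := by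
        simp only [Bool.or_eq_false_iff, beq_eq_false_iff_ne, ne_eq]
        constructor
        · rw [hmt]; simp at hlen; omega
        · simp at hlen; omega
      rw [hendF]
      simp only [Bool.false_eq_true, if_false, List.append_nil]
      rw [show i + t + 1 = i + (t + 1) by omega]
      rw [ih (by simp) rest (t+1) _ _ _ (by omega) (by simp at hlen ⊢; push_cast; omega)]
      by_cases hc : (c != '.') = true <;>
        simp [hc, pvND_cons, pvPosAfter, pvEmitAll, List.append_assoc, add_assoc]

theorem pvFragLen (cs : List Char) {width i L : Int} (hw : 0 < width) (hi0 : 0 ≤ i)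
    (hin : i < (cs.length : Int))
    (hL : L = if width ≤ (cs.length : Int) - i then width else (cs.length : Int) - i) :
    (((cs.drop i.toNat).take width.toNat).length : Int) = L := by
  simp only [List.length_take, List.length_drop]
  by_cases hc : width ≤ (cs.length : Int) - i <;> simp [hc] at hL <;> omega

theorem pvDropSplit (cs : List Char) {width i L : Int} (hw : 0 < width) (hi0 : 0 ≤ i)
    (hin : i < (cs.length : Int))
    (hL : L = if width ≤ (cs.length : Int) - i then width else (cs.length : Int) - i) :
    cs.drop i.toNat = (cs.drop i.toNat).take width.toNat ++ cs.drop (i + L).toNat := by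
  by_cases hc : width ≤ (cs.length : Int) - i
  · simp only [hc, if_true] at hL
    rw [hL, show (i + width).toNat = i.toNat + width.toNat by omega, ← List.drop_drop]
    exact (List.take_append_drop _ _).symm
  · simp only [hc, if_false] at hL
    have h1 : cs.drop (i + L).toNat = [] := by
      apply List.drop_eq_nil_of_le; omega
    have h2 : (cs.drop i.toNat).take width.toNat = cs.drop i.toNat := by
      apply List.take_of_length_le; simp [List.length_drop]; omega
    rw [h1, h2, List.append_nil]

theorem pvTakeSplit (cs : List Char) {width i L : Int} (hw : 0 < width) (hi0 : 0 ≤ i)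
    (hin : i < (cs.length : Int))
    (hL : L = if width ≤ (cs.length : Int) - i then width else (cs.length : Int) - i) :
    cs.take (i + L).toNat = cs.take i.toNat ++ (cs.drop i.toNat).take width.toNat := by
  by_cases hc : width ≤ (cs.length : Int) - i
  · simp only [hc, if_true] at hL
    rw [hL, show (i + width).toNat = i.toNat + width.toNat by omega, List.take_add]
  · simp only [hc, if_false] at hL
    have h2 : (cs.drop i.toNat).take width.toNat = cs.drop i.toNat := by
      apply List.take_of_length_le; simp [List.length_drop]; omega
    have h3 : cs.take (i + L).toNat = cs := List.take_of_length_le (by omega)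
    rw [h2, h3, List.take_append_drop]

theorem pvBlock (d : PySem.Dict Int String) (gapped : Bool) {width i L : Int} (cs : List Char)
    (hw : 0 < width) (hi0 : 0 ≤ i) (hmod : PySem.Int.mod i width = 0) (hin : i < (cs.length : Int))
    (hL : L = if width ≤ (cs.length : Int) - i then width else (cs.length : Int) - i)
    (dotfree pos : Int) (acc : List Char) :
    pvFmtGoB width d gapped (cs.length : Int) (cs.drop i.toNat) i dotfree pos acc
      = pvFmtGoB width d gapped (cs.length : Int) (cs.drop (i + L).toNat) (i + L)
          (dotfree + pvND ((cs.drop i.toNat).take width.toNat))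
          (pvPosAfter gapped ((cs.drop i.toNat).take width.toNat) (if gapped then dotfree else i))
          (acc ++ pvHdr width (cs.length : Int) i
            ++ pvEmitAll d gapped ((cs.drop i.toNat).take width.toNat) (if gapped then dotfree else i)
            ++ ['\n', '\n']) := by
  have hfl := pvFragLen cs hw hi0 hin hL
  have hsplit := pvDropSplit cs hw hi0 hin hL
  have hbounds : 1 ≤ L ∧ L ≤ width ∧ i + L ≤ (cs.length : Int) ∧ (L = width ∨ i + L = (cs.length : Int)) := by
    by_cases hc : width ≤ (cs.length : Int) - i <;> simp only [hc, if_true, if_false] at hL <;>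
      refine ⟨by omega, by omega, by omega, ?_⟩
    · left; omega
    · right; omega
  obtain ⟨hL1, hLw, hLn, hOr⟩ := hbounds
  cases hfrag : (cs.drop i.toNat).take width.toNat with
  | nil => rw [hfrag] at hfl; simp at hfl; omega
  | cons c ft =>
    rw [hfrag] at hfl hsplit
    rw [hsplit, List.cons_append, pvStepB_hdr d gapped _ c _ dotfree pos acc hmod]
    cases ft with
    | nil =>
      have hLone : L = 1 := by simp at hfl; omega
      have hendT : (PySem.Int.mod i width == width - 1 || i == (cs.length : Int) - 1) = true := by
        simp only [Bool.or_eq_true, beq_iff_eq]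
        rcases hOr with h | h
        · left; omega
        · right; omega
      rw [hendT]
      simp only [List.nil_append, if_true]
      rw [show i + 1 = i + L by omega]
      by_cases hc : (c != '.') = true <;>
        simp [hc, pvND, List.filter_cons, pvPosAfter, pvEmitAll, List.append_assoc]
    | cons c2 ft' =>
      have hL2 : 2 ≤ L := by simp at hfl; omega
      have hendF : (PySem.Int.mod i width == width - 1 || i == (cs.length : Int) - 1) = false := by
        simp only [Bool.or_eq_false_iff, beq_eq_false_iff_ne, ne_eq]
        exact ⟨by omega, by omega⟩
      rw [hendF]
      simp only [Bool.false_eq_true, if_false, List.append_nil]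
      rw [show i + 1 = i + (1:Int) by ring]
      rw [pvInner d gapped hw hmod hLw hLn hOr (c2 :: ft') (by simp) _ 1 _ _ _ (by omega)
        (by simp at hfl ⊢; push_cast; omega)]
      by_cases hc : (c != '.') = true <;>
        simp [hc, pvND_cons, pvPosAfter, pvEmitAll, List.append_assoc, add_assoc]


theorem pvOuter (d : PySem.Dict Int String) (gapped : Bool) {width : Int} (hw : 0 < width)
    (cs : List Char) :
    ∀ (m : Nat) (i : Int), 0 ≤ i → PySem.Int.mod i width = 0 → (cs.length : Int) ≤ i + m →
    ∀ (pos : Int) (acc : List Char),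
    pvFmtGoB width d gapped (cs.length : Int) (cs.drop i.toNat) i (pvND (cs.take i.toNat)) pos acc
      = pvFmtGoA cs width d gapped (PySem.List.pyRange i (cs.length : Int) width) (i + 1)
          (1 + (if gapped then pvND (cs.take i.toNat) else i)) acc := by
  intro m
  induction m with
  | zero =>
    intro i hi0 hmod hb pos acc
    rw [List.drop_eq_nil_of_le (by omega), pvRange_nil hw (by push_cast at hb; omega)]
    simp [pvFmtGoA, pvFmtGoB]
  | succ m ih =>
    intro i hi0 hmod hb pos acc
    by_cases hin : (cs.length : Int) ≤ i
    · rw [List.drop_eq_nil_of_le (by omega), pvRange_nil hw hin]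
      simp [pvFmtGoA, pvFmtGoB]
    · replace hin : i < (cs.length : Int) := by omega
      have hL : (if width ≤ (cs.length : Int) - i then width else (cs.length : Int) - i)
          = if width ≤ (cs.length : Int) - i then width else (cs.length : Int) - i := rfl
      set L := if width ≤ (cs.length : Int) - i then width else (cs.length : Int) - i with hLdef
      set frag := (cs.drop i.toNat).take width.toNat with hfragdef
      have hfl : ((frag.length : Int)) = L := pvFragLen cs hw hi0 hin hLdef
      have htake := pvTakeSplit cs hw hi0 hin hLdef
      have hbounds : 1 ≤ L ∧ L ≤ width ∧ i + L ≤ (cs.length : Int) ∧ (L = width ∨ i + L = (cs.length : Int)) := by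
        by_cases hc : width ≤ (cs.length : Int) - i <;> simp only [hc, if_true, if_false] at hLdef <;>
          refine ⟨by omega, by omega, by omega, ?_⟩
        · left; omega
        · right; omega
      obtain ⟨hL1, hLw, hLn, hOr⟩ := hbounds
      -- B side: process one block
      rw [pvBlock d gapped cs hw hi0 hmod hin hLdef]
      -- A side: one chunk
      rw [pvRange_cons hw hin]
      simp only [pvFmtGoA]
      have hslice : PySem.List.slice cs (some i) (some (i + width)) = frag := by
        rw [PySem.List.slice_toNat cs hi0 (by omega : (0:Int) ≤ i + width), show ((i+width).toNat - i.toNat) = width.toNat by omega,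
          hfragdef]
      rw [hslice, pvApplyAnnots_eq]
      have hug : (1 + (if gapped then pvND (cs.take i.toNat) else i)) - 1
          = (if gapped then pvND (cs.take i.toNat) else i) := by ring
      have hndtake : pvND (cs.take (i + L).toNat) = pvND (cs.take i.toNat) + pvND frag := by
        rw [htake, pvND_append]
      -- the accumulated chunk strings are equal
      have hacc : ∀ X : List Char,
          acc ++ pvHdr width (cs.length : Int) i ++ X ++ ['\n', '\n']
            = (if 10 < frag.length then
                (acc ++ pvLjust5 (i + 1)) ++ List.replicate (frag.length - 10) ' '
                  ++ pvRjust5 (i + 1 + (frag.length : Int) - 1)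
              else (acc ++ pvLjust5 (i + 1))) ++ ['\n'] ++ X ++ ['\n', '\n'] := by
        intro X
        have hblk : (if width ≤ (cs.length : Int) - i then width else (cs.length : Int) - i)
            = (frag.length : Int) := by rw [hfl, hLdef]
        rw [pvHdr]
        simp only [← hLdef, hfl.symm]
        by_cases h10 : 10 < frag.length
        · rw [if_pos (by exact_mod_cast h10), if_pos h10,
            show (((frag.length : Int)) - 10).toNat = frag.length - 10 by omega,
            show i + (frag.length : Int) = i + 1 + (frag.length : Int) - 1 by ring]
          simp [List.append_assoc]
        · rw [if_neg (by exact_mod_cast h10), if_neg h10]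
          simp [List.append_assoc]
      rcases hOr with hcase | hcase
      · -- full-width block: continue by induction hypothesis
        have hmod' : PySem.Int.mod (i + L) width = 0 := by rw [hcase]; exact pvMod_add_width hw hmod
        rw [hug, pvReplace_len,
          ← hacc (pvEmitAll d gapped frag (if gapped then pvND (cs.take i.toNat) else i))]
        rw [show i + 1 + (frag.length : Int) = (i + L) + 1 by omega]
        rw [show i + width = i + L by omega]
        rw [show pvND (cs.take i.toNat) + pvND frag = pvND (cs.take (i + L).toNat) from hndtake.symm]
        rw [show (1 + (if gapped then pvND (cs.take i.toNat) else i))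
              + (if gapped then pvND frag else (frag.length : Int))
            = 1 + (if gapped then pvND (cs.take (i + L).toNat) else (i + L)) from by
          cases gapped <;> simp [hndtake] <;> omega]
        exact ih (i + L) (by omega) hmod' (by omega) _ _
      · -- truncated last block: both loops end here
        have hdropnil : cs.drop (i + L).toNat = [] := List.drop_eq_nil_of_le (by omega)
        have hrangenil : PySem.List.pyRange (i + width) (cs.length : Int) width = [] := by
          apply pvRange_nil hw
          by_cases hc : width ≤ (cs.length : Int) - i <;> simp only [hc, if_true, if_false] at hLdef <;> omega
        rw [hdropnil, hrangenil]
        simp only [pvFmtGoA, pvFmtGoB]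
        rw [hug, ← hacc (pvEmitAll d gapped frag (if gapped then pvND (cs.take i.toNat) else i))]

-- ===== VERDICT (by name: the statement is the Claim_ definition above) =====
theorem format_nuc_sequence_spec : Claim_equal_format_nuc_sequence := by
  unfold Claim_equal_format_nuc_sequence Spec_format_nuc_sequence
  intro seq width ra gapped _ hpre
  cases seq with
  | none => rfl
  | some s =>
    simp only [format_nuc_sequence, format_nuc_sequence_alt]
    by_cases hnil : s.toList.length = 0
    · simp [hnil]
    · have hwid : width ≠ 0 := by
        rcases hpre with h | h | h
        · exact absurd h (by simp)
        · exfalso; apply hnil; simp at h; rw [h]; rfl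
        · exact h
      rcases lt_or_gt_of_ne hwid with hw | hw
      · -- negative width: the range is empty, A returns '', B returns ''
        rw [if_neg hnil, if_pos (by simp; omega)]
        rw [pvRange_neg_nil hw (by positivity)]
        rfl
      · -- positive width
        rw [if_neg hnil, if_neg (by simp only [Bool.or_eq_true, decide_eq_true_eq, not_or]; exact ⟨hnil, by omega⟩)]
        have h0 : PySem.Int.mod 0 width = 0 := by simp [PySem.Int.mod, Int.zero_fmod]
        have := pvOuter (pvDict ra) gapped hw s.toList s.toList.length 0 le_rfl h0
          (by simp) 0 []
        simp only [Int.toNat_zero, List.drop_zero, List.take_zero] at this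
        rw [show pvND [] = 0 from rfl] at this
        rw [show (1 + (if gapped then (0:Int) else 0)) = 1 from by cases gapped <;> simp,
          show (0:Int) + 1 = 1 from rfl] at this
        rw [this]
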